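-- pv_equiv track=rewrite | github.com/AlexMilenkov1/Fundamentals-Python | methods_and_functions/EEXE/center_point.py | closet_to_0
-- ===== SOURCE A (Python) =====
-- def closet_to_0(coordinates):
--     smallest_coordinate_nums = []
--
--     for _ in range(len(coordinates)):
--         smallest_coordinate_num = min(coordinates, key=abs)
--
--         if smallest_coordinate_num not in smallest_coordinate_nums:
--             smallest_coordinate_nums.append(smallest_coordinate_num)
--
--         coordinates.remove(smallest_coordinate_num)
--
--         if len(smallest_coordinate_nums) == 2:
--             break
--
--     return smallest_coordinate_nums
-- ===== SOURCE B (Python) =====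
-- def closet_to_0(coordinates):
--     result = []
--     for num in sorted(coordinates, key=abs):
--         if num not in result:
--             result.append(num)
--             if len(result) == 2:
--                 break
--     return result
-- ===== Notes on version B (the rewrite author's own statement) =====
-- stated objective: simpler
-- what changed: B replaces A's repeated min(…, key=abs)+list.remove selection loop with a single stable sort by abs followed by a scan collecting the first two distinct values (B also does not mutate the input list, which A empties via remove).
import Mathlib
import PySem

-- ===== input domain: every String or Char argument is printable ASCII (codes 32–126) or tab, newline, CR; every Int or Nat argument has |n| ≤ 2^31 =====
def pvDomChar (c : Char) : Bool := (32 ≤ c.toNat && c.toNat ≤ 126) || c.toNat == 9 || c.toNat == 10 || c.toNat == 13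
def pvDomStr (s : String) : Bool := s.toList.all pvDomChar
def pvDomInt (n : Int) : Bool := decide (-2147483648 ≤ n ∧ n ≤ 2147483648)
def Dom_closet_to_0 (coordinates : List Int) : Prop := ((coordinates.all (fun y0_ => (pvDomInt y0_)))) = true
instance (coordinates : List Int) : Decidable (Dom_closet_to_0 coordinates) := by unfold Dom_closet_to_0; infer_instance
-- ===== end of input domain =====

-- B replaces A's repeated min-by-abs extraction with one stable sort by abs plus a scan for
-- the first two distinct values (objective: simpler; equivalence is about the RETURN value only —
-- Python A mutates its argument via list.remove, B does not).

-- ===== PORT A =====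
-- A's loop: fuel = the initial length (range(len(coordinates))); state = (remaining coordinates, collected nums)
def closetLoopA (fuel : Nat) (coords : List Int) (nums : List Int) : List Int :=
  match fuel with
  | 0 => nums
  | k + 1 =>
    match PySem.List.min? coords (fun x => |x|) with
    | none => nums  -- Python min would raise here; unreachable (coords is nonempty while fuel > 0)
    | some m =>
      let nums' := if m ∈ nums then nums else nums ++ [m]
      match PySem.List.remove? coords m with
      | none => nums'  -- Python list.remove would raise; unreachable (m ∈ coords)
      | some coords' => if nums'.length = 2 then nums' else closetLoopA k coords' nums'

def closet_to_0 (coordinates : List Int) : List Int :=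
  closetLoopA coordinates.length coordinates []

-- ===== PORT B =====
-- B's scan over the abs-sorted list, collecting distinct values until two are found
def closetScanB (xs : List Int) (result : List Int) : List Int :=
  match xs with
  | [] => result
  | num :: rest =>
    if num ∈ result then closetScanB rest result
    else
      let result' := result ++ [num]
      if result'.length = 2 then result' else closetScanB rest result'

def closet_to_0_alt (coordinates : List Int) : List Int :=
  closetScanB (PySem.List.sorted coordinates (fun x => |x|)) []

-- ===== PRECONDITION & SPEC =====
def Spec_closet_to_0 (coordinates : List Int) (out : List Int) : Prop := out = closet_to_0_alt coordinates
instance (coordinates : List Int) (out : List Int) : Decidable (Spec_closet_to_0 coordinates out) := by unfold Spec_closet_to_0; infer_instance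

-- ===== CLAIM (what is proved, stated in full; the proofs are below) =====
def Claim_equal_closet_to_0 : Prop := ∀ (coordinates : List Int), Dom_closet_to_0 coordinates → Spec_closet_to_0 coordinates (closet_to_0 coordinates)

-- ===== LEMMAS AND PROOFS =====

-- min over ys ++ [z] is one more fold step on min over ys
lemma min?_append_last_none (ys : List Int) (z : Int) (key : Int → Int)
    (hy : PySem.List.min? ys key = none) :
    PySem.List.min? (ys ++ [z]) key = some z := by
  simp only [PySem.List.min?] at hy ⊢
  simp only [List.foldl_append, List.foldl_cons, List.foldl_nil, hy]

lemma min?_append_last_some (ys : List Int) (z n : Int) (key : Int → Int)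
    (hy : PySem.List.min? ys key = some n) :
    PySem.List.min? (ys ++ [z]) key = if key z < key n then some z else some n := by
  simp only [PySem.List.min?] at hy ⊢
  simp only [List.foldl_append, List.foldl_cons, List.foldl_nil, hy]

-- insertion sort of ys ++ [z] = insert z into insertion sort of ys
lemma sorted_append_last (ys : List Int) (z : Int) (key : Int → Int) :
    PySem.List.sorted (ys ++ [z]) key false =
      PySem.List.insertBy (fun a b => decide (key a < key b)) z (PySem.List.sorted ys key false) := by
  rw [PySem.List.sorted_eq_foldl_insertBy, PySem.List.sorted_eq_foldl_insertBy, List.foldl_append]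
  rfl

lemma insertBy_cons_of_before {α : Type} (before : α → α → Bool) (x y : α) (ys : List α)
    (h : before x y = true) :
    PySem.List.insertBy before x (y :: ys) = x :: y :: ys := by
  simp [PySem.List.insertBy, h]

lemma insertBy_cons_of_not_before {α : Type} (before : α → α → Bool) (x y : α) (ys : List α)
    (h : before x y = false) :
    PySem.List.insertBy before x (y :: ys) = y :: PySem.List.insertBy before x ys := by
  simp [PySem.List.insertBy, h]

-- the crux: a stable sort starts with the FIRST minimal element, and its tail is the
-- stable sort of the list with that element removed (selection = stable sort)
lemma sorted_eq_min_cons (key : Int → Int) :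
    ∀ (xs : List Int) (m : Int), PySem.List.min? xs key = some m →
      PySem.List.sorted xs key false = m :: PySem.List.sorted (xs.erase m) key false := by
  intro xs
  induction xs using List.reverseRecOn with
  | nil => intro m h; simp [PySem.List.min?] at h
  | append_singleton ys z ih =>
    intro m h
    cases hy : PySem.List.min? ys key with
    | none =>
      have hys : ys = [] := (PySem.List.min?_eq_none_iff ys key).1 hy
      subst hys
      rw [min?_append_last_none _ _ _ hy] at h
      simp only [List.nil_append] at h ⊢
      cases h
      simp [PySem.List.sorted, PySem.List.insertBy]
    | some n =>
      rw [min?_append_last_some _ _ _ _ hy] at h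
      by_cases hlt : key z < key n
      · rw [if_pos hlt] at h
        cases h
        have hznys : z ∉ ys := by
          intro hmem
          exact absurd (PySem.List.min?_isMin hy z hmem) (by omega)
        rw [List.erase_append_right _ hznys]
        simp only [List.erase_cons_head, List.append_nil]
        rw [sorted_append_last]
        cases hs : PySem.List.sorted ys key false with
        | nil => simp [PySem.List.insertBy]
        | cons h0 t0 =>
          have h0mem : h0 ∈ ys := by
            have : h0 ∈ PySem.List.sorted ys key false := by rw [hs]; exact List.mem_cons_self
            exact (PySem.List.mem_sorted _ _ _ _).1 this
          have : key z < key h0 := lt_of_lt_of_le hlt (PySem.List.min?_isMin hy h0 h0mem)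
          rw [insertBy_cons_of_before _ _ _ _ (by simpa using this)]
      · rw [if_neg hlt] at h
        cases h
        have hmem : m ∈ ys := PySem.List.min?_mem hy
        rw [List.erase_append_left _ hmem]
        rw [sorted_append_last, ih m hy]
        rw [insertBy_cons_of_not_before _ _ _ _ (by simpa using not_lt.1 hlt)]
        rw [← sorted_append_last]

-- the loops agree: A's selection loop with full fuel = B's scan over the sorted list
lemma loop_eq_scan :
    ∀ (fuel : Nat) (coords nums : List Int), fuel = coords.length → nums.length ≤ 1 →
      closetLoopA fuel coords nums =
        closetScanB (PySem.List.sorted coords (fun x => |x|) false) nums := by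
  intro fuel
  induction fuel with
  | zero =>
    intro coords nums hlen _
    have : coords = [] := by
      cases coords with
      | nil => rfl
      | cons a t => simp at hlen
    subst this
    rfl
  | succ k ih =>
    intro coords nums hlen hnums
    obtain ⟨m, hm⟩ : ∃ m, PySem.List.min? coords (fun x => |x|) = some m := by
      cases hmin : PySem.List.min? coords (fun x => |x|) with
      | none =>
        have : coords = [] := (PySem.List.min?_eq_none_iff coords _).1 hmin
        subst this; simp at hlen
      | some m => exact ⟨m, rfl⟩
    have hmemc : m ∈ coords := PySem.List.min?_mem hm
    have hrem : PySem.List.remove? coords m = some (coords.erase m) :=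
      PySem.List.remove?_eq_some_erase coords m hmemc
    have herlen : k = (coords.erase m).length := by
      have := List.length_erase_of_mem hmemc; omega
    rw [sorted_eq_min_cons _ coords m hm]
    simp only [closetLoopA, hm, hrem, closetScanB]
    by_cases hin : m ∈ nums
    · simp only [if_pos hin]
      have : ¬ nums.length = 2 := by omega
      rw [if_neg this]
      exact ih _ _ herlen hnums
    · simp only [if_neg hin]
      by_cases h2 : (nums ++ [m]).length = 2
      · rw [if_pos h2, if_pos h2]
      · rw [if_neg h2, if_neg h2]
        have hl : (nums ++ [m]).length = nums.length + 1 := by simp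
        have : (nums ++ [m]).length ≤ 1 := by rw [hl] at h2 ⊢; omega
        exact ih _ _ herlen this

-- ===== VERDICT (by name: the statement is the Claim_ definition above) =====
theorem closet_to_0_spec : Claim_equal_closet_to_0 := by
  intro coordinates _
  unfold Spec_closet_to_0 closet_to_0 closet_to_0_alt
  exact loop_eq_scan coordinates.length coordinates [] rfl (by simp)
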